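-- pv_equiv track=rewrite | github.com/wyjw/regex | run.py | to_z3
-- ===== SOURCE A (Python) =====
-- def to_z3(form):
--     i = 0
--     indexes5 = []
--     indexes4 = []
--     indexes3 = []
--     indexes2 = []
--     indexes1 = []
--     while (i < len(form)):
--         if form[i:i+5] == 'aaaaa' or form[i:i+5] == 'bbbbb':
--             indexes5.append(i)
--             indexes5.append(i+5)
--             i += 5
--         elif form[i:i+4] == 'aaaa' or form[i:i+4] == 'bbbb':
--             indexes4.append(i)
--             indexes4.append(i+4)
--             i += 4
--         elif form[i:i+3] == 'aaa' or form[i:i+3] == 'bbb':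
--             indexes3.append(i)
--             indexes3.append(i+3)
--             i += 3
--         elif form[i:i+2] == 'aa' or form[i: i+2] == 'bb':
--             indexes2.append(i)
--             indexes2.append(i+2)
--             i += 2
--         elif form[i:i+1] == 'a' or form[i: i+1] == 'b':
--             indexes1.append(i)
--             indexes1.append(i+1)
--             i += 1
--         else:
--             i += 1
--     return indexes5, indexes4, indexes3, indexes2, indexes1
-- ===== SOURCE B (Python) =====
-- def to_z3(form):
--     buckets = {5: [], 4: [], 3: [], 2: [], 1: []}
--     n = len(form)
--     i = 0
--     while i < n:
--         ch = form[i]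
--         j = i
--         while j < n and form[j] == ch:
--             j += 1
--         if ch == 'a' or ch == 'b':
--             start = i
--             left = j - i
--             while left > 0:
--                 c = min(left, 5)
--                 buckets[c].append(start)
--                 buckets[c].append(start + c)
--                 start += c
--                 left -= c
--         i = j
--     return buckets[5], buckets[4], buckets[3], buckets[2], buckets[1]
-- ===== Notes on version B (the rewrite author's own statement) =====
-- stated objective: faster
-- what changed: Replaces A's per-position greedy matching of 5..1-length slice patterns by a single maximal-run scan that splits each 'a'/'b' run arithmetically into chunks of at most 5 (min(remaining,5)) and skips non-'a'/'b' runs wholesale.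
import Mathlib
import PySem

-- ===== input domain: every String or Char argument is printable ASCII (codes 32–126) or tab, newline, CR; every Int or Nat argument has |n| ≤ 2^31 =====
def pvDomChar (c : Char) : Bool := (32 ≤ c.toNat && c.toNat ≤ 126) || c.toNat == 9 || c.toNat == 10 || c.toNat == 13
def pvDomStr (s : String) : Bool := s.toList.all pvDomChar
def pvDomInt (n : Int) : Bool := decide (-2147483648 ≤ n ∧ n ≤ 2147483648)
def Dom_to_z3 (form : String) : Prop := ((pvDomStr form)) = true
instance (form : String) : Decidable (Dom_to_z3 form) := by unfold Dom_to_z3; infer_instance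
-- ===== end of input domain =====

-- B replaces A's per-position greedy slice matching by a single maximal-run scan that
-- splits each 'a'/'b' run arithmetically into chunks of at most 5 (objective: faster, constant-factor; measured).

-- ===== PORT A =====
-- A's while loop over index i. The suffix form[i:] is carried as a list; the slice
-- form[i:i+k] (0 ≤ i, k ≥ 0) is exactly (suffix.take k), so the port is exact.
def loopA : List Char → Int → List Int × List Int × List Int × List Int × List Int
  | [], _ => ([], [], [], [], [])
  | hd :: rest, i =>
    let s := hd :: rest
    if s.take 5 = ['a','a','a','a','a'] ∨ s.take 5 = ['b','b','b','b','b'] then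
      let (v5, v4, v3, v2, v1) := loopA (s.drop 5) (i + 5)
      (i :: (i+5) :: v5, v4, v3, v2, v1)
    else if s.take 4 = ['a','a','a','a'] ∨ s.take 4 = ['b','b','b','b'] then
      let (v5, v4, v3, v2, v1) := loopA (s.drop 4) (i + 4)
      (v5, i :: (i+4) :: v4, v3, v2, v1)
    else if s.take 3 = ['a','a','a'] ∨ s.take 3 = ['b','b','b'] then
      let (v5, v4, v3, v2, v1) := loopA (s.drop 3) (i + 3)
      (v5, v4, i :: (i+3) :: v3, v2, v1)
    else if s.take 2 = ['a','a'] ∨ s.take 2 = ['b','b'] then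
      let (v5, v4, v3, v2, v1) := loopA (s.drop 2) (i + 2)
      (v5, v4, v3, i :: (i+2) :: v2, v1)
    else if s.take 1 = ['a'] ∨ s.take 1 = ['b'] then
      let (v5, v4, v3, v2, v1) := loopA rest (i + 1)
      (v5, v4, v3, v2, i :: (i+1) :: v1)
    else
      loopA rest (i + 1)
  termination_by s _ => s.length
  decreasing_by all_goals (simp only [List.length_drop, List.length_cons]; omega)

def to_z3 (form : String) : List Int × List Int × List Int × List Int × List Int :=
  loopA form.toList 0

-- ===== PORT B =====
-- componentwise append of the five buckets
def mergeP (x y : List Int × List Int × List Int × List Int × List Int) :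
    List Int × List Int × List Int × List Int × List Int :=
  (x.1 ++ y.1, x.2.1 ++ y.2.1, x.2.2.1 ++ y.2.2.1, x.2.2.2.1 ++ y.2.2.2.1, x.2.2.2.2 ++ y.2.2.2.2)

-- the pair (i, i+c) placed into bucket c
def pairP (c : Nat) (i : Int) : List Int × List Int × List Int × List Int × List Int :=
  match c with
  | 5 => ([i, i+5], [], [], [], [])
  | 4 => ([], [i, i+4], [], [], [])
  | 3 => ([], [], [i, i+3], [], [])
  | 2 => ([], [], [], [i, i+2], [])
  | 1 => ([], [], [], [], [i, i+1])
  | _ => ([], [], [], [], [])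

-- B's inner chunking loop: while left > 0: c = min(left,5); record (start, start+c)
def chunksB (i : Int) (L : Nat) : List Int × List Int × List Int × List Int × List Int :=
  if L = 0 then ([], [], [], [], [])
  else
    let c := min L 5
    mergeP (pairP c i) (chunksB (i + c) (L - c))
  termination_by L
  decreasing_by omega

-- B's outer loop: find the maximal run at the head, chunk it if 'a'/'b', skip it otherwise
def loopB : List Char → Int → List Int × List Int × List Int × List Int × List Int
  | [], _ => ([], [], [], [], [])
  | c :: rest, i =>
    let k := (rest.takeWhile (· == c)).length
    let tail := rest.drop k
    if c = 'a' ∨ c = 'b' then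
      mergeP (chunksB i (k + 1)) (loopB tail (i + (k : Int) + 1))
    else
      loopB tail (i + (k : Int) + 1)
  termination_by s _ => s.length
  decreasing_by all_goals (simp only [List.length_drop, List.length_cons]; omega)

def to_z3_alt (form : String) : List Int × List Int × List Int × List Int × List Int :=
  loopB form.toList 0

-- ===== PRECONDITION & SPEC =====
def Spec_to_z3 (form : String) (out : List Int × List Int × List Int × List Int × List Int) : Prop := out = to_z3_alt form
instance (form : String) (out : List Int × List Int × List Int × List Int × List Int) : Decidable (Spec_to_z3 form out) := by unfold Spec_to_z3; infer_instance

-- ===== CLAIM (what is proved, stated in full; the proofs are below) =====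
def Claim_equal_to_z3 : Prop := ∀ (form : String), Dom_to_z3 form → Spec_to_z3 form (to_z3 form)

-- ===== LEMMAS AND PROOFS =====

theorem mergeP_nil_left (x : List Int × List Int × List Int × List Int × List Int) :
    mergeP ([], [], [], [], []) x = x := by
  obtain ⟨a, b, c, d, e⟩ := x; simp [mergeP]

theorem mergeP_assoc (x y z : List Int × List Int × List Int × List Int × List Int) :
    mergeP (mergeP x y) z = mergeP x (mergeP y z) := by
  simp [mergeP]

theorem lit5a : (['a','a','a','a','a'] : List Char) = List.replicate 5 'a' := rfl
theorem lit5b : (['b','b','b','b','b'] : List Char) = List.replicate 5 'b' := rfl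
theorem lit4a : (['a','a','a','a'] : List Char) = List.replicate 4 'a' := rfl
theorem lit4b : (['b','b','b','b'] : List Char) = List.replicate 4 'b' := rfl
theorem lit3a : (['a','a','a'] : List Char) = List.replicate 3 'a' := rfl
theorem lit3b : (['b','b','b'] : List Char) = List.replicate 3 'b' := rfl
theorem lit2a : (['a','a'] : List Char) = List.replicate 2 'a' := rfl
theorem lit2b : (['b','b'] : List Char) = List.replicate 2 'b' := rfl
theorem lit1a : (['a'] : List Char) = List.replicate 1 'a' := rfl
theorem lit1b : (['b'] : List Char) = List.replicate 1 'b' := rfl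

-- take j of a (maximal) run of c followed by t equals a literal run of d iff c = d ∧ j ≤ r
theorem take_rep_append (c d : Char) (r j : Nat) (t : List Char)
    (ht : t.head? ≠ some c) (hr : 1 ≤ r) (hj : 1 ≤ j) :
    ((List.replicate r c ++ t).take j = List.replicate j d) ↔ (c = d ∧ j ≤ r) := by
  constructor
  · intro h
    have h0 := congrArg (fun l => l[0]?) h
    simp only [List.getElem?_take, List.getElem?_append_right, List.getElem?_replicate,
      List.length_replicate] at h0
    rw [if_pos (by omega), List.getElem?_append_left (by simp; omega)] at h0
    have hcd : c = d := by
      rw [List.getElem?_replicate, if_pos (show 0 < r by omega),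
        if_pos (show 0 < j by omega)] at h0
      exact Option.some.inj h0
    refine ⟨hcd, ?_⟩
    by_contra hjr
    push_neg at hjr
    have hR := congrArg (fun l => l[r]?) h
    simp only [List.getElem?_take, if_pos hjr, List.getElem?_replicate, if_pos hjr] at hR
    rw [List.getElem?_append_right (by simp)] at hR
    simp only [List.length_replicate, Nat.sub_self] at hR
    have : t.head? = some d := by
      cases t with
      | nil => simp at hR
      | cons x xs => simpa using hR
    exact ht (by rw [this, hcd])
  · rintro ⟨rfl, hjr⟩
    rw [List.take_append_of_le_length (by simpa using hjr), List.take_replicate,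
      Nat.min_eq_left hjr]

theorem takeWhile_rep_append (c : Char) (k : Nat) (t : List Char) (ht : t.head? ≠ some c) :
    (List.replicate k c ++ t).takeWhile (· == c) = List.replicate k c := by
  induction k with
  | zero =>
    cases t with
    | nil => simp
    | cons x xs =>
      simp only [List.replicate, List.nil_append, List.takeWhile]
      have : ¬ (x == c) := by simp_all
      simp [this]
  | succ n ih => simp [List.replicate_succ, List.takeWhile, ih]

theorem loopB_run (c : Char) (k : Nat) (t : List Char) (i : Int) (ht : t.head? ≠ some c) :
    loopB (List.replicate (k + 1) c ++ t) i =
      if c = 'a' ∨ c = 'b' then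
        mergeP (chunksB i (k + 1)) (loopB t (i + (k : Int) + 1))
      else loopB t (i + (k : Int) + 1) := by
  have hsplit : List.replicate (k + 1) c ++ t = c :: (List.replicate k c ++ t) := by
    simp [List.replicate_succ]
  have htw : (List.replicate k c ++ t).takeWhile (· == c) = List.replicate k c :=
    takeWhile_rep_append c k t ht
  have hdrop : (List.replicate k c ++ t).drop k = t := by
    have := List.drop_left (l₁ := List.replicate k c) (l₂ := t)
    simpa using this
  rw [hsplit, loopB]
  simp only [htw, List.length_replicate, hdrop]

theorem loopA_skip (c : Char) (hc : ¬ (c = 'a' ∨ c = 'b')) (r : Nat) (t : List Char)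
    (ht : t.head? ≠ some c) (i : Int) :
    loopA (List.replicate r c ++ t) i = loopA t (i + (r : Int)) := by
  induction r generalizing i with
  | zero => simp
  | succ m ih =>
    have hne : ∀ j, 1 ≤ j →
        (List.replicate (m + 1) c ++ t).take j ≠ List.replicate j 'a' ∧
        (List.replicate (m + 1) c ++ t).take j ≠ List.replicate j 'b' := by
      intro j hj
      constructor <;>
      · rw [Ne, take_rep_append c _ (m + 1) j t ht (by omega) hj]
        rintro ⟨rfl, -⟩
        exact hc (by tauto)
    have h5 := hne 5 (by omega); have h4 := hne 4 (by omega)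
    have h3 := hne 3 (by omega); have h2 := hne 2 (by omega)
    have h1 := hne 1 (by omega)
    rw [List.replicate_succ, List.cons_append, loopA]
    simp only [show (c :: (List.replicate m c ++ t)) = List.replicate (m + 1) c ++ t by
      simp [List.replicate_succ]]
    rw [if_neg (by tauto), if_neg (by tauto), if_neg (by tauto), if_neg (by tauto),
      if_neg (by tauto)]
    rw [ih (i + 1)]
    congr 1
    push_cast
    ring

theorem loopA_run (c : Char) (hc : c = 'a' ∨ c = 'b') (r : Nat) (t : List Char)
    (ht : t.head? ≠ some c) (i : Int) :
    loopA (List.replicate r c ++ t) i = mergeP (chunksB i r) (loopA t (i + (r : Int))) := by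
  induction r using Nat.strong_induction_on generalizing i with
  | _ r IH =>
  have hpos : ∀ (j : Nat), 1 ≤ j → 1 ≤ r → j ≤ r →
      (List.replicate r c ++ t).take j = List.replicate j 'a' ∨
      (List.replicate r c ++ t).take j = List.replicate j 'b' := by
    intro j hj h1 hjr
    rcases hc with rfl | rfl
    · exact Or.inl ((take_rep_append _ _ r j t ht h1 hj).mpr ⟨rfl, hjr⟩)
    · exact Or.inr ((take_rep_append _ _ r j t ht h1 hj).mpr ⟨rfl, hjr⟩)
  have hneg : ∀ (j : Nat), 1 ≤ j → 1 ≤ r → ¬ j ≤ r →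
      ¬ ((List.replicate r c ++ t).take j = List.replicate j 'a' ∨
         (List.replicate r c ++ t).take j = List.replicate j 'b') := by
    intro j hj h1 hjr hor
    rcases hor with h | h
    · exact hjr ((take_rep_append _ _ r j t ht h1 hj).mp h).2
    · exact hjr ((take_rep_append _ _ r j t ht h1 hj).mp h).2
  rcases Nat.eq_zero_or_pos r with rfl | hr1
  · rw [chunksB]
    simp [mergeP_nil_left]
  have hcons : List.replicate r c ++ t = c :: (List.replicate (r - 1) c ++ t) := by
    conv_lhs => rw [show r = (r - 1) + 1 by omega]
    simp [List.replicate_succ]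
  rcases Nat.lt_or_ge r 5 with hr5 | hr5
  · -- 1 ≤ r ≤ 4 : A's branch r fires and consumes the whole run
    have hdropr : (List.replicate r c ++ t).drop r = t := by
      have := List.drop_left (l₁ := List.replicate r c) (l₂ := t)
      simpa using this
    interval_cases r
    · rw [hcons, loopA]
      simp only [← hcons]
      rw [lit5a, lit5b, lit4a, lit4b, lit3a, lit3b, lit2a, lit2b, lit1a, lit1b]
      rw [if_neg (hneg 5 (by omega) (by omega) (by omega)),
          if_neg (hneg 4 (by omega) (by omega) (by omega)),
          if_neg (hneg 3 (by omega) (by omega) (by omega)),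
          if_neg (hneg 2 (by omega) (by omega) (by omega)),
          if_pos (hpos 1 (by omega) (by omega) (by omega))]
      rw [show List.replicate (1 - 1) c ++ t = t by norm_num]
      push_cast
      rcases hA : loopA t (i + 1) with ⟨v5, v4, v3, v2, v1⟩
      simp [chunksB, mergeP, pairP]
    · rw [hcons, loopA]
      simp only [← hcons]
      rw [lit5a, lit5b, lit4a, lit4b, lit3a, lit3b, lit2a, lit2b, lit1a, lit1b]
      rw [if_neg (hneg 5 (by omega) (by omega) (by omega)),
          if_neg (hneg 4 (by omega) (by omega) (by omega)),
          if_neg (hneg 3 (by omega) (by omega) (by omega)),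
          if_pos (hpos 2 (by omega) (by omega) (by omega))]
      rw [show (List.replicate 2 c ++ t).drop 2 = t from hdropr]
      push_cast
      rcases hA : loopA t (i + 2) with ⟨v5, v4, v3, v2, v1⟩
      simp [chunksB, mergeP, pairP]
    · rw [hcons, loopA]
      simp only [← hcons]
      rw [lit5a, lit5b, lit4a, lit4b, lit3a, lit3b, lit2a, lit2b, lit1a, lit1b]
      rw [if_neg (hneg 5 (by omega) (by omega) (by omega)),
          if_neg (hneg 4 (by omega) (by omega) (by omega)),
          if_pos (hpos 3 (by omega) (by omega) (by omega))]
      rw [show (List.replicate 3 c ++ t).drop 3 = t from hdropr]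
      push_cast
      rcases hA : loopA t (i + 3) with ⟨v5, v4, v3, v2, v1⟩
      simp [chunksB, mergeP, pairP]
    · rw [hcons, loopA]
      simp only [← hcons]
      rw [lit5a, lit5b, lit4a, lit4b, lit3a, lit3b, lit2a, lit2b, lit1a, lit1b]
      rw [if_neg (hneg 5 (by omega) (by omega) (by omega)),
          if_pos (hpos 4 (by omega) (by omega) (by omega))]
      rw [show (List.replicate 4 c ++ t).drop 4 = t from hdropr]
      push_cast
      rcases hA : loopA t (i + 4) with ⟨v5, v4, v3, v2, v1⟩
      simp [chunksB, mergeP, pairP]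
  · -- r ≥ 5 : A's 5-branch fires, leaving a run of r - 5
    have hdrop5 : (List.replicate r c ++ t).drop 5 = List.replicate (r - 5) c ++ t := by
      rw [List.drop_append_of_le_length (by simpa using hr5), List.drop_replicate]
    have hch : chunksB i r = mergeP (pairP 5 i) (chunksB (i + 5) (r - 5)) := by
      conv_lhs => rw [chunksB]
      rw [if_neg (by omega)]
      simp only [Nat.min_eq_right hr5]
      norm_num
    rw [hcons, loopA]
    simp only [← hcons]
    rw [lit5a, lit5b, lit4a, lit4b, lit3a, lit3b, lit2a, lit2b, lit1a, lit1b]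
    rw [if_pos (hpos 5 (by omega) (by omega) (by omega))]
    rw [hdrop5, IH (r - 5) (by omega) (i + 5)]
    rw [hch, mergeP_assoc]
    have hidx : i + 5 + ((r - 5 : Nat) : Int) = i + (r : Int) := by omega
    rw [hidx]
    rcases hX : mergeP (chunksB (i + 5) (r - 5)) (loopA t (i + (r : Int))) with ⟨v5, v4, v3, v2, v1⟩
    simp [mergeP, pairP]

theorem dropWhile_head_ne (p : Char → Bool) (l : List Char) (x : Char)
    (hx : (l.dropWhile p).head? = some x) : p x = false := by
  induction l with
  | nil => simp at hx
  | cons a as ih =>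
    by_cases h : p a
    · rw [List.dropWhile_cons_of_pos h] at hx
      exact ih hx
    · rw [List.dropWhile_cons_of_neg h] at hx
      simp only [List.head?_cons, Option.some.injEq] at hx
      subst hx
      simpa using h

theorem loop_main (n : Nat) : ∀ s : List Char, s.length ≤ n → ∀ i : Int, loopA s i = loopB s i := by
  induction n with
  | zero =>
    intro s hs i
    have : s = [] := by cases s <;> simp_all
    subst this
    rw [loopA, loopB]
  | succ n ih =>
    intro s hs i
    cases s with
    | nil => rw [loopA, loopB]
    | cons c rest =>
      set k := (rest.takeWhile (· == c)).length with hk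
      have htw : rest.takeWhile (· == c) = List.replicate k c := by
        rw [List.eq_replicate_iff]
        refine ⟨rfl, fun b hb => ?_⟩
        have := List.mem_takeWhile_imp hb
        simpa using this
      have hrest : rest = List.replicate k c ++ rest.dropWhile (· == c) := by
        conv_lhs => rw [← List.takeWhile_append_dropWhile (p := (· == c)) (l := rest)]
        rw [htw]
      have hdrop : rest.drop k = rest.dropWhile (· == c) := by
        conv_lhs => rw [hrest]
        have := List.drop_left (l₁ := List.replicate k c) (l₂ := rest.dropWhile (· == c))
        simpa using this
      have ht : (rest.dropWhile (· == c)).head? ≠ some c := by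
        intro h
        have := dropWhile_head_ne (· == c) rest c h
        simp at this
      have hdecomp : c :: rest = List.replicate (k + 1) c ++ rest.dropWhile (· == c) := by
        conv_lhs => rw [hrest]
        simp [List.replicate_succ]
      have hlen : (rest.dropWhile (· == c)).length ≤ n := by
        have h1 : (rest.dropWhile (· == c)).length ≤ rest.length := by
          rw [← hdrop]; simpa using Nat.sub_le rest.length k
        simp only [List.length_cons] at hs
        omega
      by_cases hab : c = 'a' ∨ c = 'b'
      · rw [hdecomp, loopA_run c hab (k + 1) _ ht i,
            loopB_run c k _ i ht, if_pos hab]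
        rw [ih _ hlen]
        congr 1
        push_cast
        ring
      · rw [hdecomp, loopA_skip c hab (k + 1) _ ht i,
            loopB_run c k _ i ht, if_neg hab]
        rw [ih _ hlen]
        congr 1
        push_cast
        ring

-- ===== VERDICT (by name: the statement is the Claim_ definition above) =====
theorem to_z3_spec : Claim_equal_to_z3 := by
  intro form _
  unfold Spec_to_z3 to_z3 to_z3_alt
  exact loop_main form.toList.length form.toList le_rfl 0
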